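-- pv_equiv track=rewrite | github.com/Benmoshangsang/Brand-Model-Classification-and-Bolt-Detection-in-Pre-Disassembly-Inspection-of-EV-Battery-Packs | object_detection/tools/.ipynb_checkpoints/mamba_vision-checkpoint.py | _anti_diag_indices
-- ===== SOURCE A (Python) =====
-- def _anti_diag_indices(w: int):
--     # 生成副对角线（右上->左下）顺序
--     inds = []
--     for s in range(2*w-1):
--         row_start = max(0, s-(w-1))
--         row_end = min(w-1, s)
--         line = []
--         for r in range(row_start, row_end+1):
--             c = s - r
--             line.append((r, w-1-c))
--         inds.extend(line)
--     return inds
-- ===== SOURCE B (Python) =====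
-- def _anti_diag_indices(w: int):
--     buckets = {d: [] for d in range(-(w - 1), w)}
--     for r in range(w):
--         for c in range(w):
--             buckets[r - c].append((r, c))
--     out = []
--     for d in range(-(w - 1), w):
--         out.extend(buckets[d])
--     return out
-- ===== Notes on version B (the rewrite author's own statement) =====
-- stated objective: alternative
-- what changed: B replaces A's per-antidiagonal double loop with bounds arithmetic and a column flip by a single row-major scan that groups cells into a dict keyed by d = r - c, then concatenates the buckets in key order.
import Mathlib
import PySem

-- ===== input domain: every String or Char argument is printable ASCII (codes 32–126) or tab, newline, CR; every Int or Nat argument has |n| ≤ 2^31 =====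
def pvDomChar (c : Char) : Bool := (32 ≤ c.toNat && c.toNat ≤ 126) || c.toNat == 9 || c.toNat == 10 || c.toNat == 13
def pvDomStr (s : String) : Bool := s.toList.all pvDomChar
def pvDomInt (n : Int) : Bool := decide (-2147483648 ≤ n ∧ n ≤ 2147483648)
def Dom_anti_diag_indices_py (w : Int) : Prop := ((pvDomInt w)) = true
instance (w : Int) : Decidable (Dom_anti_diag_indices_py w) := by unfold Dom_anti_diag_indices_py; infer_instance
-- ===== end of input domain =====

-- B replaces A's per-antidiagonal bounds arithmetic by one row-major scan bucketing cells in a dict keyed by d = r - c, then concatenating buckets in key order (alternative decomposition, same cost).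


-- ===== PORT A =====
def anti_diag_indices_py (w : Int) : List (Int × Int) :=
  (PySem.List.pyRange 0 (2*w-1) 1).foldl (fun inds s =>
    let row_start := max 0 (s - (w-1))
    let row_end := min (w-1) s
    let line := (PySem.List.pyRange row_start (row_end+1) 1).map (fun r => (r, w-1-(s-r)))
    inds ++ line) []

-- ===== PORT B =====
-- 'buckets[r-c].append((r,c))' / 'buckets[d]' are ported as Dict.modify / Dict.getD with
-- default []; exact here because every key r-c (resp. d) was pre-inserted by the comprehension.
def anti_diag_indices_py_alt (w : Int) : List (Int × Int) :=
  let init : PySem.Dict Int (List (Int × Int)) :=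
    (PySem.List.pyRange (-(w-1)) w 1).foldl (fun b d => b.insert d []) PySem.Dict.empty
  let buckets : PySem.Dict Int (List (Int × Int)) :=
    (PySem.List.pyRange 0 w 1).foldl (fun b r =>
      (PySem.List.pyRange 0 w 1).foldl (fun b c =>
        b.modify (r - c) [] (· ++ [(r, c)])) b) init
  (PySem.List.pyRange (-(w-1)) w 1).foldl (fun out d => out ++ buckets.getD d []) []

-- ===== PRECONDITION & SPEC =====
def Spec_anti_diag_indices_py (w : Int) (out : List (Int × Int)) : Prop := out = anti_diag_indices_py_alt w
instance (w : Int) (out : List (Int × Int)) : Decidable (Spec_anti_diag_indices_py w out) := by unfold Spec_anti_diag_indices_py; infer_instance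

-- ===== CLAIM (what is proved, stated in full; the proofs are below) =====
def Claim_equal_anti_diag_indices_py : Prop := ∀ (w : Int), Dom_anti_diag_indices_py w → Spec_anti_diag_indices_py w (anti_diag_indices_py w)

-- ===== LEMMAS AND PROOFS =====

-- all grid cells in row-major order, keyed by their diagonal d = r - c
def pvAllPairs (w : Int) : List (Int × (Int × Int)) :=
  (PySem.List.pyRange 0 w 1).flatMap (fun r =>
    (PySem.List.pyRange 0 w 1).map (fun c => (r - c, (r, c))))

theorem pvFoldNest {α β γ : Type} (l : List α) (g : α → List β) (f : γ → β → γ) (init : γ) :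
    l.foldl (fun acc x => (g x).foldl f acc) init = (l.flatMap g).foldl f init := by
  induction l generalizing init with
  | nil => rfl
  | cons a t ih => simp only [List.foldl_cons, List.flatMap_cons, List.foldl_append, ih]

theorem pvFlatMapIf {α β : Type} (l : List α) (p : α → Bool) (f : α → β) :
    l.flatMap (fun x => if p x then [f x] else []) = (l.filter p).map f := by
  induction l with
  | nil => rfl
  | cons a t ih =>
    by_cases h : p a <;> simp [List.flatMap_cons, h, ih]

theorem pvFilterFlatMap {α β : Type} (l : List α) (g : α → List β) (p : β → Bool) :
    (l.flatMap g).filter p = l.flatMap (fun x => (g x).filter p) := by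
  induction l with
  | nil => rfl
  | cons a t ih => simp [List.flatMap_cons, List.filter_append, ih]

theorem pvSortedExt (xs ys : List Int) (hx : List.Pairwise (· < ·) xs)
    (hy : List.Pairwise (· < ·) ys) (h : ∀ a, a ∈ xs ↔ a ∈ ys) : xs = ys :=
  List.Perm.eq_of_pairwise (fun _ _ _ _ h1 h2 => le_antisymm h1 h2)
    (hx.imp le_of_lt) (hy.imp le_of_lt)
    ((List.perm_ext_iff_of_nodup hx.nodup hy.nodup).mpr h)

theorem pvFilterRange (w lo hi : Int) (p : Int → Bool)
    (hp : ∀ r, p r = true ↔ (lo ≤ r ∧ r < hi)) :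
    (PySem.List.pyRange 0 w 1).filter p = PySem.List.pyRange (max 0 lo) (min w hi) 1 := by
  apply pvSortedExt
  · exact (PySem.List.pairwise_lt_pyRange_one 0 w).filter p
  · exact PySem.List.pairwise_lt_pyRange_one _ _
  · intro a
    simp only [List.mem_filter, PySem.List.mem_pyRange_one, hp]
    omega

-- the bucket of diagonal d, read off the row-major pair list
theorem pvBucket (w d : Int) :
    ((pvAllPairs w).filter (fun p => p.1 == d)).map (·.2) =
      (PySem.List.pyRange (max 0 d) (min w (d + w)) 1).map (fun r => (r, r - d)) := by
  unfold pvAllPairs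
  rw [pvFilterFlatMap]
  have hinner : ∀ r : Int,
      ((PySem.List.pyRange 0 w 1).map (fun c => (r - c, (r, c)))).filter (fun p => p.1 == d)
        = if (decide (d ≤ r) && decide (r < d + w)) then [(d, (r, r - d))] else [] := by
    intro r
    rw [List.filter_map]
    have hfun : ((fun p : Int × (Int × Int) => p.1 == d) ∘ fun c => (r - c, (r, c)))
        = fun c => c == r - d := by
      funext c
      simp only [Function.comp]
      by_cases h : r - c = d
      · simp [show c = r - d by omega]
      · simp [h, show c ≠ r - d by omega]
    rw [hfun, List.filter_beq]
    by_cases hm : r - d ∈ PySem.List.pyRange 0 w 1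
    · have h1 : (PySem.List.pyRange 0 w 1).count (r - d) = 1 :=
        List.count_eq_one_of_mem (PySem.List.nodup_pyRange_one 0 w) hm
      rw [PySem.List.mem_pyRange_one] at hm
      have : (decide (d ≤ r) && decide (r < d + w)) = true := by
        simp only [Bool.and_eq_true, decide_eq_true_eq]; omega
      rw [this, h1]
      simp only [List.replicate, List.map_cons, List.map_nil, if_true]
      have : r - (r - d) = d := by ring
      simp [this]
    · have h0 : (PySem.List.pyRange 0 w 1).count (r - d) = 0 :=
        List.count_eq_zero_of_not_mem hm
      rw [PySem.List.mem_pyRange_one] at hm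
      have : (decide (d ≤ r) && decide (r < d + w)) = false := by
        simp only [Bool.and_eq_false_iff, decide_eq_false_iff_not]; omega
      rw [this, h0]
      simp
  calc ((PySem.List.pyRange 0 w 1).flatMap (fun r =>
          ((PySem.List.pyRange 0 w 1).map (fun c => (r - c, (r, c)))).filter
            (fun p => p.1 == d))).map (·.2)
      = ((PySem.List.pyRange 0 w 1).flatMap (fun r =>
          if (decide (d ≤ r) && decide (r < d + w)) then [(d, (r, r - d))] else [])).map (·.2) := by
        congr 1
        exact List.flatMap_congr (fun r _ => hinner r)
    _ = (((PySem.List.pyRange 0 w 1).filter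
          (fun r => decide (d ≤ r) && decide (r < d + w))).map (fun r => (d, (r, r - d)))).map (·.2) := by
        rw [pvFlatMapIf]
    _ = (PySem.List.pyRange (max 0 d) (min w (d + w)) 1).map (fun r => (r, r - d)) := by
        rw [pvFilterRange w d (d + w) _ (by intro r; simp)]
        simp [List.map_map, Function.comp]

theorem pvA_eq (w : Int) : anti_diag_indices_py w =
    (PySem.List.pyRange 0 (2*w-1) 1).flatMap (fun s =>
      (PySem.List.pyRange (max 0 (s-(w-1))) (min (w-1) s + 1) 1).map (fun r => (r, w-1-(s-r)))) := by
  unfold anti_diag_indices_py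
  rw [PySem.List.foldl_append_eq_flatMap]
  simp

theorem pvGetDInsertNil (l : List Int) (b0 : PySem.Dict Int (List (Int × Int))) (c : Int)
    (h : b0.getD c [] = []) :
    (l.foldl (fun b d => b.insert d []) b0).getD c [] = [] := by
  induction l generalizing b0 with
  | nil => exact h
  | cons a t ih =>
    apply ih
    rw [PySem.Dict.getD_insert]
    split_ifs <;> simp [h]

theorem pvB_eq (w : Int) : anti_diag_indices_py_alt w =
    (PySem.List.pyRange (-(w-1)) w 1).flatMap (fun d =>
      (PySem.List.pyRange (max 0 d) (min w (d + w)) 1).map (fun r => (r, r - d))) := by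
  unfold anti_diag_indices_py_alt
  dsimp only
  set init : PySem.Dict Int (List (Int × Int)) :=
    (PySem.List.pyRange (-(w-1)) w 1).foldl (fun b d => b.insert d []) PySem.Dict.empty with hinit
  have hb : ((PySem.List.pyRange 0 w 1).foldl (fun b r =>
      (PySem.List.pyRange 0 w 1).foldl (fun b c =>
        b.modify (r - c) [] (· ++ [(r, c)])) b) init)
      = (pvAllPairs w).foldl (fun b p => b.modify p.1 [] (· ++ [p.2])) init := by
    unfold pvAllPairs
    rw [← pvFoldNest]
    congr 1
    funext b r
    rw [List.foldl_map]
  rw [hb, PySem.List.foldl_append_eq_flatMap]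
  simp only [List.nil_append]
  apply List.flatMap_congr
  intro d _
  rw [PySem.Dict.getD_foldl_modify_append,
    pvGetDInsertNil _ _ _ (by rw [PySem.Dict.getD_empty]), List.nil_append, pvBucket]

theorem pvMain (w : Int) : anti_diag_indices_py w = anti_diag_indices_py_alt w := by
  rw [pvA_eq, pvB_eq]
  rw [PySem.List.pyRange_one 0 (2*w-1), PySem.List.pyRange_one (-(w-1)) w]
  have hn : (w - -(w-1)).toNat = (2*w-1-0).toNat := by omega
  rw [hn, List.flatMap_map, List.flatMap_map]
  apply List.flatMap_congr
  intro k _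
  have hmin : min (w-1) (0 + (k:Int)) + 1 = min w (-(w-1) + k + w) := by omega
  have hmax : max 0 (0 + (k:Int) - (w-1)) = max 0 (-(w-1) + k) := by omega
  rw [hmin, hmax]
  apply List.map_congr_left
  intro r _
  have : w - 1 - (0 + (k:Int) - r) = r - (-(w-1) + k) := by ring
  rw [this]

-- ===== VERDICT (by name: the statement is the Claim_ definition above) =====
theorem anti_diag_indices_py_spec : Claim_equal_anti_diag_indices_py := by
  intro w _
  unfold Spec_anti_diag_indices_py
  exact pvMain w
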